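-- pv_equiv track=rewrite | github.com/sonirn/Heist | coqui_voice_manager.py | _analyze_character_traits
-- ===== SOURCE A (Python) =====
-- from typing import Dict, List, Optional, Any, Tuple
--
-- def _analyze_character_traits(character_name: str, script: str) -> List[str]:
--     """Analyze character traits from script"""
--     traits = []
--
--     # Simple trait analysis based on character name and context
--     name_lower = character_name.lower()
--
--     if any(word in name_lower for word in ['child', 'kid', 'boy', 'girl', 'baby']):
--         traits.extend(['young', 'high-pitched', 'energetic'])
--     elif any(word in name_lower for word in ['old', 'elder', 'grand']):
--         traits.extend(['wise', 'experienced', 'calm'])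
--     elif any(word in name_lower for word in ['villain', 'bad', 'evil', 'dark']):
--         traits.extend(['dramatic', 'deep', 'intimidating'])
--     elif any(word in name_lower for word in ['hero', 'main', 'protagonist']):
--         traits.extend(['engaging', 'warm', 'confident'])
--     elif any(word in name_lower for word in ['narrator', 'voice']):
--         traits.extend(['professional', 'clear', 'authoritative'])
--     else:
--         traits.extend(['distinctive', 'memorable', 'expressive'])
--
--     return traits
-- ===== SOURCE B (Python) =====
-- # Different algorithm: instead of ordered group checks with early exit, flatten all
-- # keywords into one keyword->priority map, do ONE exhaustive pass computing the
-- # minimum priority among matching keywords, then index a traits table by it.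
-- # Correct because A's elif chain returns the first (= lowest-indexed) matching group.
-- _KEYWORD_PRIORITY = {
--     'child': 0, 'kid': 0, 'boy': 0, 'girl': 0, 'baby': 0,
--     'old': 1, 'elder': 1, 'grand': 1,
--     'villain': 2, 'bad': 2, 'evil': 2, 'dark': 2,
--     'hero': 3, 'main': 3, 'protagonist': 3,
--     'narrator': 4, 'voice': 4,
-- }
--
-- _TRAITS_BY_PRIORITY = [
--     ['young', 'high-pitched', 'energetic'],
--     ['wise', 'experienced', 'calm'],
--     ['dramatic', 'deep', 'intimidating'],
--     ['engaging', 'warm', 'confident'],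
--     ['professional', 'clear', 'authoritative'],
--     ['distinctive', 'memorable', 'expressive'],
-- ]
--
-- def _analyze_character_traits(character_name: str, script: str) -> list:
--     name_lower = character_name.lower()
--     best = 5  # priority of the default traits
--     for keyword, priority in _KEYWORD_PRIORITY.items():
--         if priority < best and keyword in name_lower:
--             best = priority
--     return list(_TRAITS_BY_PRIORITY[best])
-- ===== Notes on version B (the rewrite author's own statement) =====
-- stated objective: alternative
-- what changed: Replaced the ordered elif chain of per-group any() checks by a flat keyword->priority map scanned once while maintaining the minimum matched priority, which then indexes a traits table (min matched priority = first matching group).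
import Mathlib
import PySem

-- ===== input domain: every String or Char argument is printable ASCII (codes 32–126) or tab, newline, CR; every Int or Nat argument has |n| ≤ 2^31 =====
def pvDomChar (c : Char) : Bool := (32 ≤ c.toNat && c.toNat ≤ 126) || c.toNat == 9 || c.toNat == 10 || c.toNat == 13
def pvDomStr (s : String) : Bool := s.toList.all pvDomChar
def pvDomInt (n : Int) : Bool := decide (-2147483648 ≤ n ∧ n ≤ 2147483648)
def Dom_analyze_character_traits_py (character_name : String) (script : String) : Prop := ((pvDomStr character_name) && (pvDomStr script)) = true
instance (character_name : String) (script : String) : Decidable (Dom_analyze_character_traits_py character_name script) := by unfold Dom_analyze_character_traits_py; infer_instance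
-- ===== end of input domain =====

-- B replaces A's ordered elif chain by one exhaustive pass over a flat keyword->priority
-- map keeping the minimum matched priority, then indexing a traits table (alternative; same cost).


-- ===== PORT A =====
-- Literal port of A's elif chain; 'word in name_lower' = PySem.Str.isIn word name_lower.
def analyze_character_traits_py (character_name : String) (script : String) : List String :=
  let name_lower := PySem.Str.lower character_name
  if ["child", "kid", "boy", "girl", "baby"].any (fun word => PySem.Str.isIn word name_lower) then
    ["young", "high-pitched", "energetic"]
  else if ["old", "elder", "grand"].any (fun word => PySem.Str.isIn word name_lower) then
    ["wise", "experienced", "calm"]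
  else if ["villain", "bad", "evil", "dark"].any (fun word => PySem.Str.isIn word name_lower) then
    ["dramatic", "deep", "intimidating"]
  else if ["hero", "main", "protagonist"].any (fun word => PySem.Str.isIn word name_lower) then
    ["engaging", "warm", "confident"]
  else if ["narrator", "voice"].any (fun word => PySem.Str.isIn word name_lower) then
    ["professional", "clear", "authoritative"]
  else
    ["distinctive", "memorable", "expressive"]

-- ===== PORT B =====
-- Flat dict keyword -> priority (insertion order, as in Source B).
def keywordPriority : List (String × Int) :=
  [("child", 0), ("kid", 0), ("boy", 0), ("girl", 0), ("baby", 0),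
   ("old", 1), ("elder", 1), ("grand", 1),
   ("villain", 2), ("bad", 2), ("evil", 2), ("dark", 2),
   ("hero", 3), ("main", 3), ("protagonist", 3),
   ("narrator", 4), ("voice", 4)]

def traitsByPriority : List (List String) :=
  [["young", "high-pitched", "energetic"],
   ["wise", "experienced", "calm"],
   ["dramatic", "deep", "intimidating"],
   ["engaging", "warm", "confident"],
   ["professional", "clear", "authoritative"],
   ["distinctive", "memorable", "expressive"]]

-- Single pass keeping the minimum matched priority; the final index is always in range
-- (0 ≤ best ≤ 5), so the pyGet? lookup's .getD [] default is unreachable.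
def analyze_character_traits_py_alt (character_name : String) (script : String) : List String :=
  let name_lower := PySem.Str.lower character_name
  let best := keywordPriority.foldl
    (fun best kv => if kv.2 < best ∧ PySem.Str.isIn kv.1 name_lower then kv.2 else best) (5 : Int)
  (PySem.List.pyGet? traitsByPriority best).getD []

-- ===== PRECONDITION & SPEC =====
def Spec_analyze_character_traits_py (character_name : String) (script : String) (out : List String) : Prop := out = analyze_character_traits_py_alt character_name script
instance (character_name : String) (script : String) (out : List String) : Decidable (Spec_analyze_character_traits_py character_name script out) := by unfold Spec_analyze_character_traits_py; infer_instance

-- ===== CLAIM (what is proved, stated in full; the proofs are below) =====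
def Claim_equal_analyze_character_traits_py : Prop := ∀ (character_name : String) (script : String), Dom_analyze_character_traits_py character_name script → Spec_analyze_character_traits_py character_name script (analyze_character_traits_py character_name script)

-- ===== LEMMAS AND PROOFS =====

-- B's fold step over a segment whose keywords all carry the same priority i:
-- the result is min acc i when some keyword matches, else acc.
theorem foldl_const_prio (nl : String) (i : Int) (kws : List String) (acc : Int) :
    (kws.map (fun k => (k, i))).foldl
      (fun best kv => if kv.2 < best ∧ PySem.Str.isIn kv.1 nl then kv.2 else best) acc
    = if kws.any (fun k => PySem.Str.isIn k nl) then min acc i else acc := by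
  induction kws generalizing acc with
  | nil => simp
  | cons k rest ih =>
    simp only [List.map_cons, List.foldl_cons, List.any_cons, ih]
    by_cases hm : PySem.Str.isIn k nl = true <;>
      by_cases hr : (rest.any fun k => PySem.Str.isIn k nl) = true <;>
        simp only [Bool.or_eq_true, hm, hr, true_or, or_true, and_true, if_true, min_def] <;>
        split_ifs <;> first | omega | tauto

theorem keywordPriority_eq :
    keywordPriority
    = (["child", "kid", "boy", "girl", "baby"].map (fun k => (k, (0 : Int))))
      ++ (["old", "elder", "grand"].map (fun k => (k, (1 : Int))))
      ++ (["villain", "bad", "evil", "dark"].map (fun k => (k, (2 : Int))))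
      ++ (["hero", "main", "protagonist"].map (fun k => (k, (3 : Int))))
      ++ (["narrator", "voice"].map (fun k => (k, (4 : Int)))) := rfl

-- ===== VERDICT (by name: the statement is the Claim_ definition above) =====
theorem analyze_character_traits_py_spec : Claim_equal_analyze_character_traits_py := by
  intro character_name script _
  unfold Spec_analyze_character_traits_py
  unfold analyze_character_traits_py analyze_character_traits_py_alt
  rw [keywordPriority_eq]
  simp only [List.foldl_append, foldl_const_prio]
  generalize (["child", "kid", "boy", "girl", "baby"].any
      (fun word => PySem.Str.isIn word (PySem.Str.lower character_name))) = b1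
  generalize (["old", "elder", "grand"].any
      (fun word => PySem.Str.isIn word (PySem.Str.lower character_name))) = b2
  generalize (["villain", "bad", "evil", "dark"].any
      (fun word => PySem.Str.isIn word (PySem.Str.lower character_name))) = b3
  generalize (["hero", "main", "protagonist"].any
      (fun word => PySem.Str.isIn word (PySem.Str.lower character_name))) = b4
  generalize (["narrator", "voice"].any
      (fun word => PySem.Str.isIn word (PySem.Str.lower character_name))) = b5
  revert b1 b2 b3 b4 b5
  decide
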